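-- pv_equiv track=rewrite | github.com/cutecryptid/minish-hat | minish_hat.py | label_to_ruledict
-- ===== SOURCE A (Python) =====
-- def label_to_ruledict(label, atomset=[]):
--     pheadset, nheadset = set(), set()
--     pbodyset, nbodyset = set(), set()
--     ruleatomset = set()
--     for idx,val in enumerate(label):
--         if len(atomset) == 0:
--             atom = "x" + str(len(label)-idx-1)
--         else:
--             atom = atomset[idx]
--         if val == '0':
--             nbodyset.add(atom)
--         elif val =='1':
--             pheadset.add(atom)
--             nheadset.add(atom)
--         elif val == '2':
--             pbodyset.add(atom)
--         elif val == 'o':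
--             nheadset.add(atom)
--         elif val == 'z':
--             pheadset.add(atom)
--         if val != 'x':
--             ruleatomset.add(atom)
--     return ({
--         'atoms' : ruleatomset,
--         'phead' : pheadset,
--         'nhead' : nheadset,
--         'pbody' : pbodyset,
--         'nbody' : nbodyset
--     })
-- ===== SOURCE B (Python) =====
-- def label_to_ruledict(label, atomset=[]):
--     atoms = [atomset[i] if atomset else "x" + str(len(label) - i - 1)
--              for i in range(len(label))]
--     pairs = list(zip(atoms, label))
--     return {
--         'atoms': {a for a, v in pairs if v != 'x'},
--         'phead': {a for a, v in pairs if v == '1' or v == 'z'},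
--         'nhead': {a for a, v in pairs if v == '1' or v == 'o'},
--         'pbody': {a for a, v in pairs if v == '2'},
--         'nbody': {a for a, v in pairs if v == '0'},
--     }
-- ===== Notes on version B (the rewrite author's own statement) =====
-- stated objective: alternative
-- what changed: Replaces the single dispatch loop carrying five set accumulators with a precomputed atom list and five independent filtered set-comprehensions over zip(atoms, label).
-- outside the precondition, e.g. on label_to_ruledict('01', ['a']): A raises IndexError, B raises IndexError
import Mathlib
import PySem

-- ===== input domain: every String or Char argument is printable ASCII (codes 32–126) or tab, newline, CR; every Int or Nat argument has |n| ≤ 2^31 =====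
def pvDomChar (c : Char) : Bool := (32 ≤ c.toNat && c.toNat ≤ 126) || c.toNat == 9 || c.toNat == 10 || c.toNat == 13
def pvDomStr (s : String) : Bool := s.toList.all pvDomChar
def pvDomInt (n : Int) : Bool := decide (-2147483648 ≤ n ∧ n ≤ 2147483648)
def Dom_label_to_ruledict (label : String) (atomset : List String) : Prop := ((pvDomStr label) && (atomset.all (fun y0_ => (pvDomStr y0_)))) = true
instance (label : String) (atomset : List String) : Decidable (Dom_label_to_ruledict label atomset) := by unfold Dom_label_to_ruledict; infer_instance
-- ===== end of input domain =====

-- B replaces A's single dispatch loop over five set accumulators by a precomputed atom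
-- list and five independent filtered set-comprehensions (alternative decomposition, same cost).

-- ===== PORT A =====
-- the atom named by index idx: A's first if/else of the loop body
def pvAtom (label : String) (atomset : List String) (idx : Int) : String :=
  if PySem.List.len atomset = 0
  then "x" ++ PySem.Int.toStr (PySem.Str.len label - idx - 1)
  else PySem.List.pyGetD atomset idx ""

-- the body of A's loop after the atom has been computed: the if/elif dispatch, then the 'x' test
def pvBranches (st : List String × List String × List String × List String × List String)
    (atom : String) (v : Char) :
    List String × List String × List String × List String × List String :=
  match st with
  | (ph, nh, pb, nb, ra) =>
    let t :=
      if v = '0' then (ph, nh, pb, PySem.Set.add nb atom)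
      else if v = '1' then (PySem.Set.add ph atom, PySem.Set.add nh atom, pb, nb)
      else if v = '2' then (ph, nh, PySem.Set.add pb atom, nb)
      else if v = 'o' then (ph, PySem.Set.add nh atom, pb, nb)
      else if v = 'z' then (PySem.Set.add ph atom, nh, pb, nb)
      else (ph, nh, pb, nb)
    if v ≠ 'x' then (t.1, t.2.1, t.2.2.1, t.2.2.2, PySem.Set.add ra atom)
    else (t.1, t.2.1, t.2.2.1, t.2.2.2, ra)

def label_to_ruledict (label : String) (atomset : List String) : List (String × List String) :=
  let r := (PySem.List.enumerate label.toList).foldl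
    (fun st q => pvBranches st (pvAtom label atomset q.1) q.2)
    (PySem.Set.empty, PySem.Set.empty, PySem.Set.empty, PySem.Set.empty, PySem.Set.empty)
  [("atoms", r.2.2.2.2), ("phead", r.1), ("nhead", r.2.1), ("pbody", r.2.2.1), ("nbody", r.2.2.2.1)]

-- ===== PORT B =====
def label_to_ruledict_alt (label : String) (atomset : List String) : List (String × List String) :=
  let atoms := (PySem.List.pyRange 0 (PySem.Str.len label) 1).map
    (fun i => if atomset ≠ [] then PySem.List.pyGetD atomset i ""
              else "x" ++ PySem.Int.toStr (PySem.Str.len label - i - 1))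
  let pairs := atoms.zip label.toList
  [("atoms", PySem.Set.ofList ((pairs.filter (fun p => p.2 != 'x')).map Prod.fst)),
   ("phead", PySem.Set.ofList ((pairs.filter (fun p => p.2 == '1' || p.2 == 'z')).map Prod.fst)),
   ("nhead", PySem.Set.ofList ((pairs.filter (fun p => p.2 == '1' || p.2 == 'o')).map Prod.fst)),
   ("pbody", PySem.Set.ofList ((pairs.filter (fun p => p.2 == '2')).map Prod.fst)),
   ("nbody", PySem.Set.ofList ((pairs.filter (fun p => p.2 == '0')).map Prod.fst))]

-- ===== PRECONDITION & SPEC =====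
-- Pre_ excludes exactly the IndexError inputs: a nonempty atomset shorter than label
-- (both A and B raise IndexError there).
def Pre_label_to_ruledict (label : String) (atomset : List String) : Prop :=
  atomset = [] ∨ label.toList.length ≤ atomset.length
instance (label : String) (atomset : List String) : Decidable (Pre_label_to_ruledict label atomset) := by unfold Pre_label_to_ruledict; infer_instance

def pvWitness_label_to_ruledict : String × List String := ("01z", ["a", "b", "c"])

def Spec_label_to_ruledict (label : String) (atomset : List String) (out : List (String × List String)) : Prop := out = label_to_ruledict_alt label atomset
instance (label : String) (atomset : List String) (out : List (String × List String)) : Decidable (Spec_label_to_ruledict label atomset out) := by unfold Spec_label_to_ruledict; infer_instance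

-- ===== CLAIM (what is proved, stated in full; the proofs are below) =====
def Claim_equal_label_to_ruledict : Prop := ∀ (label : String) (atomset : List String), Dom_label_to_ruledict label atomset → Pre_label_to_ruledict label atomset → Spec_label_to_ruledict label atomset (label_to_ruledict label atomset)

-- ===== LEMMAS AND PROOFS =====

-- one step of A's dispatch, seen component-wise
theorem pvBranches_eq (ph nh pb nb ra : List String) (a : String) (v : Char) :
    pvBranches (ph, nh, pb, nb, ra) a v =
      ((if v == '1' || v == 'z' then PySem.Set.add ph a else ph),
       (if v == '1' || v == 'o' then PySem.Set.add nh a else nh),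
       (if v == '2' then PySem.Set.add pb a else pb),
       (if v == '0' then PySem.Set.add nb a else nb),
       (if v != 'x' then PySem.Set.add ra a else ra)) := by
  simp only [pvBranches, bne, beq_iff_eq, Bool.or_eq_true, Bool.not_eq_true']
  split_ifs <;> simp_all

-- A's loop splits into five independent conditional-add folds
theorem pvFold_branches (ps : List (String × Char)) (ph nh pb nb ra : List String) :
    ps.foldl (fun st p => pvBranches st p.1 p.2) (ph, nh, pb, nb, ra) =
      (ps.foldl (fun s p => if p.2 == '1' || p.2 == 'z' then PySem.Set.add s p.1 else s) ph,
       ps.foldl (fun s p => if p.2 == '1' || p.2 == 'o' then PySem.Set.add s p.1 else s) nh,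
       ps.foldl (fun s p => if p.2 == '2' then PySem.Set.add s p.1 else s) pb,
       ps.foldl (fun s p => if p.2 == '0' then PySem.Set.add s p.1 else s) nb,
       ps.foldl (fun s p => if p.2 != 'x' then PySem.Set.add s p.1 else s) ra) := by
  induction ps generalizing ph nh pb nb ra with
  | nil => rfl
  | cons q qs ih => simp only [List.foldl_cons, pvBranches_eq, ih]

-- a conditional-add fold is the plain add fold over the filtered list
theorem pvFold_filter (pred : String × Char → Bool) (ps : List (String × Char)) (a : List String) :
    ps.foldl (fun s p => if pred p then PySem.Set.add s p.1 else s) a =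
      ((ps.filter pred).map Prod.fst).foldl PySem.Set.add a := by
  induction ps generalizing a with
  | nil => rfl
  | cons q qs ih =>
    by_cases h : pred q <;> simp [h, ih]

-- zipping an index-mapped range with the list is mapping over enumerate
theorem pvZip_range (f : Int → String) (xs : List Char) (s : Int) :
    ((PySem.List.pyRange s (s + xs.length) 1).map f).zip xs =
      (PySem.List.enumerate xs s).map (fun q => (f q.1, q.2)) := by
  induction xs generalizing s with
  | nil => simp [PySem.List.pyRange]
  | cons x xs ih =>
    rw [PySem.List.pyRange_one_cons (by push_cast [List.length_cons]; omega)]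
    simp only [List.map_cons, List.zip_cons_cons, PySem.List.enumerate_cons]
    have : s + 1 + (xs.length : Int) = s + ((x :: xs).length : Int) := by
      push_cast [List.length_cons]; omega
    rw [← this, ih]

-- specialisation of pvZip_range to start 0 and an Int-cast length bound
theorem pvZip_range0 (f : Int → String) (xs : List Char) :
    ((PySem.List.pyRange 0 (xs.length : Int) 1).map f).zip xs =
      (PySem.List.enumerate xs 0).map (fun q => (f q.1, q.2)) := by
  have h := pvZip_range f xs 0
  simpa using h

-- A's loop over enumerate, with the atom computed from the index, is the pair-dispatch
-- loop over the index-mapped pair list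
theorem pvA_to_pairs (g : Int → String) (xs : List Char)
    (init : List String × List String × List String × List String × List String) :
    (PySem.List.enumerate xs).foldl (fun st q => pvBranches st (g q.1) q.2) init =
      ((PySem.List.enumerate xs).map (fun q => (g q.1, q.2))).foldl
        (fun st p => pvBranches st p.1 p.2) init := by
  rw [List.foldl_map]

-- ===== VERDICT (by name: the statement is the Claim_ definition above) =====
theorem label_to_ruledict_spec : Claim_equal_label_to_ruledict := by
  intro label atomset _ hpre
  unfold Spec_label_to_ruledict label_to_ruledict label_to_ruledict_alt
  dsimp only
  have hfun : (fun i : Int => if atomset ≠ [] then PySem.List.pyGetD atomset i ""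
              else "x" ++ PySem.Int.toStr (PySem.Str.len label - i - 1)) =
      (fun i : Int => pvAtom label atomset i) := by
    funext i
    unfold pvAtom
    rcases eq_or_ne atomset [] with h | h
    · subst h; simp [PySem.List.len]
    · have hlen : ¬ (PySem.List.len atomset = 0) := by
        simp [PySem.List.len, List.length_eq_zero_iff, h]
      rw [if_pos h, if_neg hlen]
  rw [hfun]
  simp only [PySem.Str.len_eq]
  rw [pvZip_range0]
  rw [pvA_to_pairs (pvAtom label atomset)]
  rw [pvFold_branches]
  simp only [pvFold_filter, PySem.Set.ofList_eq_foldl, PySem.Set.empty]
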